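-- pv_equiv track=rewrite | github.com/albertwh1te/Gate-of-Babylon | algorithms/acm/search.py | topk_min_stack
-- ===== SOURCE A (Python) =====
-- def topk_min_stack(array, k):
--     if len(array) <= k:
--         return array
--     min_stack = sorted(array[:k])
--     max_value = min_stack[k - 1]
--     for i in array[k:]:
--         if i < max_value:
--             min_stack.append(i)
--             min_stack.remove(max(min_stack))
--             max_value = max(min_stack)
--     return min_stack
-- ===== SOURCE B (Python) =====
-- def topk_min_stack(array, k):
--     n = len(array)
--     if n <= k:
--         return array
--     if k <= 0:
--         return []
--     pre = sorted(array[:k])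
--     p = k          # pre[:p] is the surviving part of the sorted prefix
--     tail = []      # later-admitted elements, in arrival order
--     mx = pre[k - 1]
--     for x in array[k:]:
--         if x < mx:
--             if p > 0 and pre[p - 1] == mx:
--                 p -= 1
--             else:
--                 tail.remove(mx)
--             tail.append(x)
--             mx = max(tail) if p == 0 else max(pre[p - 1], max(tail))
--     return pre[:p] + tail
-- ===== Notes on version B (the rewrite author's own statement) =====
-- stated objective: alternative
-- what changed: B freezes the sorted prefix once and maintains a cut pointer into it plus a separate overflow list and an incrementally combined maximum, instead of A's append/remove(max)/max full scans over one growing-and-shrinking list; an eviction from the prefix zone is a pointer decrement and the max is recombined from the frozen prefix boundary and the overflow list only.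
-- intended difference: For k < 0 (A still returns when len(array) >= 2*|k|+1) A's negative slice and negative index select against a wraparound threshold and return a list of len(array)-|k| elements; B returns [], the intended 'keep k smallest' answer for a non-positive k. — e.g. on topk_min_stack([1, 2, 3], -1): A returns [1, 2], B returns []
import Mathlib
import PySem

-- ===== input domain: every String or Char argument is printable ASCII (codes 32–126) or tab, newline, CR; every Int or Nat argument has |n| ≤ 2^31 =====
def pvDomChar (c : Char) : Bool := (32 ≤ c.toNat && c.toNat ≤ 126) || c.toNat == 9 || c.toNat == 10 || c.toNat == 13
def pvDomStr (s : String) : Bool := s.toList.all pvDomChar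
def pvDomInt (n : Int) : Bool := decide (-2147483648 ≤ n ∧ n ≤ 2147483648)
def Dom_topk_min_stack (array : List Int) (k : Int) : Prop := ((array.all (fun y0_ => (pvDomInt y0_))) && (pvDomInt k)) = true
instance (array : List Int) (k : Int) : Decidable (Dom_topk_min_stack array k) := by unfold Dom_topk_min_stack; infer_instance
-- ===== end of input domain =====

-- B replaces A's single mutated list (append / remove(max) / full max rescans) by a frozen sorted
-- prefix with a cut pointer, a separate overflow list and an incrementally recombined maximum
-- (objective: alternative); for k < 0, where A's negative slicing wraps around, B returns [].


-- ===== PORT A =====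
-- one iteration of A's loop; state = (min_stack, max_value).
-- The 'none' arms are Python's IndexError/ValueError situations, unreachable inside Pre_.
def topkStepA (s : List Int × Int) (i : Int) : List Int × Int :=
  if i < s.2 then
    match PySem.List.max? (s.1 ++ [i]) (fun x => x) with
    | none => (s.1 ++ [i], s.2)
    | some m =>
      match PySem.List.remove? (s.1 ++ [i]) m with
      | none => (s.1 ++ [i], s.2)
      | some l2 =>
        match PySem.List.max? l2 (fun x => x) with
        | none => (l2, s.2)
        | some m2 => (l2, m2)
  else s

def topk_min_stack (array : List Int) (k : Int) : List Int :=
  if (array.length : Int) ≤ k then array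
  else
    let ms := PySem.List.sorted (PySem.List.slice array none (some k)) (fun x => x) false
    match PySem.List.pyGet? ms (k - 1) with
    | none => []   -- IndexError, unreachable inside Pre_
    | some mv =>
      ((PySem.List.slice array (some k) none).foldl topkStepA (ms, mv)).1

-- ===== PORT B =====
-- one iteration of B's loop; state = (p, tail, mx); pre is the frozen sorted prefix.
def topkStepB (pre : List Int) (s : Int × List Int × Int) (x : Int) : Int × List Int × Int :=
  if x < s.2.2 then
    let pt : Int × List Int :=
      if 0 < s.1 ∧ PySem.List.pyGet? pre (s.1 - 1) = some s.2.2 then (s.1 - 1, s.2.1)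
      else (s.1, (PySem.List.remove? s.2.1 s.2.2).getD s.2.1)
    let tl2 := pt.2 ++ [x]
    let mx2 :=
      if pt.1 = 0 then (PySem.List.max? tl2 (fun y => y)).getD s.2.2
      else max (PySem.List.pyGetD pre (pt.1 - 1) s.2.2) ((PySem.List.max? tl2 (fun y => y)).getD s.2.2)
    (pt.1, tl2, mx2)
  else s

def topk_min_stack_alt (array : List Int) (k : Int) : List Int :=
  if (array.length : Int) ≤ k then array
  else if k ≤ 0 then []
  else
    let pre := PySem.List.sorted (PySem.List.slice array none (some k)) (fun x => x) false
    let mx0 := PySem.List.pyGetD pre (k - 1) 0   -- in range: pre has length k ≥ 1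
    let st := (PySem.List.slice array (some k) none).foldl (topkStepB pre) (k, [], mx0)
    PySem.List.slice pre none (some st.1) ++ st.2.1

-- ===== PRECONDITION & SPEC =====
-- Pre_ is exactly where the Python A returns: k > 0 always returns; k = 0 returns only on [];
-- k < 0 returns iff len(array) ≥ 2*|k|+1 (otherwise min_stack[k-1] is an IndexError).
def Pre_topk_min_stack (array : List Int) (k : Int) : Prop :=
  0 < k ∨ (array = [] ∧ 0 ≤ k) ∨ (k < 0 ∧ 2 * (-k) + 1 ≤ (array.length : Int))
instance (array : List Int) (k : Int) : Decidable (Pre_topk_min_stack array k) := by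
  unfold Pre_topk_min_stack; infer_instance
def pvWitness_topk_min_stack : List Int × Int := ([3, 1, 2], 2)

-- For k < 0 (where A still returns: len(array) ≥ 2*|k|+1) A's negative slice and negative index
-- select against a wraparound threshold and return len(array)-|k| elements; B returns [], the
-- intended "keep k smallest" answer for a non-positive k.
def D_topk_min_stack (array : List Int) (k : Int) : Prop := k < 0
instance (array : List Int) (k : Int) : Decidable (D_topk_min_stack array k) := by
  unfold D_topk_min_stack; infer_instance

def Spec_topk_min_stack (array : List Int) (k : Int) (out : List Int) : Prop :=
  ¬ D_topk_min_stack array k → out = topk_min_stack_alt array k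
instance (array : List Int) (k : Int) (out : List Int) : Decidable (Spec_topk_min_stack array k out) := by
  unfold Spec_topk_min_stack; infer_instance

def pvDiffWitness_topk_min_stack : List Int × Int := ([1, 2, 3], -1)
def pvDiffWitnessOut_topk_min_stack : (List Int) × (List Int) := ([1, 2], [])

-- ===== CLAIM (what is proved, stated in full; the proofs are below) =====
def Claim_unchanged_topk_min_stack : Prop := ∀ (array : List Int) (k : Int), Dom_topk_min_stack array k → Pre_topk_min_stack array k → Spec_topk_min_stack array k (topk_min_stack array k)
def Claim_changed_topk_min_stack : Prop := Dom_topk_min_stack (pvDiffWitness_topk_min_stack.1) (pvDiffWitness_topk_min_stack.2) ∧ Pre_topk_min_stack (pvDiffWitness_topk_min_stack.1) (pvDiffWitness_topk_min_stack.2) ∧ D_topk_min_stack (pvDiffWitness_topk_min_stack.1) (pvDiffWitness_topk_min_stack.2) ∧ topk_min_stack (pvDiffWitness_topk_min_stack.1) (pvDiffWitness_topk_min_stack.2) = pvDiffWitnessOut_topk_min_stack.1 ∧ topk_min_stack_alt (pvDiffWitness_topk_min_stack.1) (pvDiffWitness_topk_min_stack.2) = pvDiffWitnessOut_topk_min_stack.2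 ∧ pvDiffWitnessOut_topk_min_stack.1 ≠ pvDiffWitnessOut_topk_min_stack.2
def Claim_exact_topk_min_stack : Prop := ∀ (array : List Int) (k : Int), Dom_topk_min_stack array k → Pre_topk_min_stack array k → D_topk_min_stack array k → topk_min_stack array k ≠ topk_min_stack_alt array k

-- ===== LEMMAS AND PROOFS =====

-- a list all of whose elements equal v commutes with [v]
lemma all_eq_append_singleton (t : List Int) (v : Int)
    (h : ∀ y ∈ t, y = v) : t ++ [v] = v :: t := by
  induction t with
  | nil => rfl
  | cons x t ih =>
    have hx : x = v := h x (by simp)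
    subst hx
    simp only [List.cons_append, ih (fun y hy => h y (by simp [hy]))]

-- erasing one copy of the maximum of a sorted list and re-appending it is the identity
lemma erase_max_append (S : List Int) (v : Int)
    (hs : S.Pairwise (· ≤ ·)) (hm : v ∈ S) (hub : ∀ y ∈ S, y ≤ v) :
    S.erase v ++ [v] = S := by
  induction S with
  | nil => cases hm
  | cons x t ih =>
    by_cases hx : x = v
    · subst hx
      rw [List.erase_cons_head]
      exact all_eq_append_singleton t x fun y hy =>
        le_antisymm (hub y (by simp [hy])) (List.rel_of_pairwise_cons hs hy)
    · rw [List.erase_cons_tail (by simp [hx])]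
      have hm' : v ∈ t := by cases hm with
        | head => exact absurd rfl hx
        | tail _ h => exact h
      rw [List.cons_append, ih hs.of_cons hm' (fun y hy => hub y (by simp [hy]))]

lemma max?_eq_some_of (L : List Int) (m : Int) (hm : m ∈ L)
    (hub : ∀ y ∈ L, y ≤ m) : PySem.List.max? L (fun x => x) = some m := by
  cases hL : PySem.List.max? L (fun x => x) with
  | none =>
    rw [PySem.List.max?_eq_none_iff] at hL
    subst hL; cases hm
  | some m' =>
    have h1 := PySem.List.max?_mem hL
    have h2 := PySem.List.max?_isMax hL
    have : m' = m := le_antisymm (hub m' h1) (h2 m hm)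
    rw [this]

lemma take_eq_take_append (pre : List Int) (pn : Nat) (h1 : 0 < pn) (h2 : pn ≤ pre.length) :
    pre.take pn = pre.take (pn - 1) ++ [pre[pn - 1]'(by omega)] := by
  have h3 : pn - 1 < pre.length := by omega
  have h := List.take_add_one (l := pre) (i := pn - 1)
  rw [List.getElem?_eq_getElem h3] at h
  have hpn : pn - 1 + 1 = pn := by omega
  rw [hpn] at h
  simpa using h

-- the element at position pn-1 bounds pre.take pn from above, for sorted pre
lemma take_ub (pre : List Int) (pn : Nat) (hs : pre.Pairwise (· ≤ ·))
    (h1 : 0 < pn) (h2 : pn ≤ pre.length) :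
    ∀ y ∈ pre.take pn, y ≤ pre[pn - 1]'(by omega) := by
  have hsp : (pre.take pn).Pairwise (· ≤ ·) := hs.sublist (List.take_sublist ..)
  rw [take_eq_take_append pre pn h1 h2] at hsp ⊢
  intro y hy
  rcases List.mem_append.1 hy with h | h
  · exact (List.pairwise_append.1 hsp).2.2 y h _ (by simp)
  · simp only [List.mem_singleton] at h
    exact le_of_eq h

-- B's recombined maximum is the maximum of A's list take p' ++ tl2
lemma newmax_spec (pre : List Int) (hs : pre.Pairwise (· ≤ ·)) (p' mxd : Int) (tl2 : List Int)
    (h0 : 0 ≤ p') (hle : p' ≤ (pre.length : Int)) (htl2 : tl2 ≠ []) :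
    PySem.List.max? (pre.take p'.toNat ++ tl2) (fun x => x) =
      some (if p' = 0 then (PySem.List.max? tl2 (fun y => y)).getD mxd
            else max (PySem.List.pyGetD pre (p' - 1) mxd) ((PySem.List.max? tl2 (fun y => y)).getD mxd)) := by
  obtain ⟨mT, hmT⟩ : ∃ mT, PySem.List.max? tl2 (fun y => y) = some mT := by
    cases h : PySem.List.max? tl2 (fun y => y) with
    | none => rw [PySem.List.max?_eq_none_iff] at h; exact absurd h htl2
    | some m => exact ⟨m, rfl⟩
  have hmTmem := PySem.List.max?_mem hmT
  have hmTub := PySem.List.max?_isMax hmT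
  by_cases hp : p' = 0
  · subst hp
    rw [if_pos rfl, hmT, Option.getD_some]
    simpa using hmT
  · rw [if_neg hp, hmT, Option.getD_some]
    have hpn : 0 < p'.toNat := by omega
    have hpnle : p'.toNat ≤ pre.length := by omega
    have hlt : p'.toNat - 1 < pre.length := by omega
    have ha1 : PySem.List.pyGetD pre (p' - 1) mxd = pre[p'.toNat - 1]'hlt := by
      have h := PySem.List.pyGetD_eq_getElem (xs := pre) (i := p' - 1) (d := mxd)
        (by omega) (by omega)
      rw [h]
      congr 1
      omega
    rw [ha1]
    apply max?_eq_some_of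
    · rcases le_total (pre[p'.toNat - 1]'hlt) mT with h | h
      · rw [max_eq_right h]
        exact List.mem_append.2 (Or.inr hmTmem)
      · rw [max_eq_left h]
        refine List.mem_append.2 (Or.inl ?_)
        rw [take_eq_take_append pre p'.toNat hpn hpnle]
        exact List.mem_append.2 (Or.inr (by simp))
    · intro y hy
      rcases List.mem_append.1 hy with h | h
      · exact le_trans (take_ub pre p'.toNat hs hpn hpnle y h) (le_max_left _ _)
      · exact le_trans (hmTub y h) (le_max_right _ _)

-- the invariant tying A's state to B's state
def TopkInv (pre : List Int) (a : List Int × Int) (b : Int × List Int × Int) : Prop :=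
  a.1 = pre.take b.1.toNat ++ b.2.1 ∧ a.2 = b.2.2 ∧ 0 ≤ b.1 ∧ b.1 ≤ (pre.length : Int) ∧
    a.2 ∈ a.1 ∧ ∀ y ∈ a.1, y ≤ a.2

lemma topkStep_inv (pre : List Int) (hs : pre.Pairwise (· ≤ ·))
    (a : List Int × Int) (b : Int × List Int × Int) (i : Int)
    (h : TopkInv pre a b) : TopkInv pre (topkStepA a i) (topkStepB pre b i) := by
  obtain ⟨L, mx⟩ := a
  obtain ⟨p, tl, mxB⟩ := b
  obtain ⟨hsplit, hmx, hp0, hple, hmem, hub⟩ := h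
  simp only at hsplit hmx hp0 hple hmem hub
  subst hmx
  by_cases hi : i < mx
  case neg =>
    simp only [topkStepA, topkStepB, if_neg hi]
    exact ⟨hsplit, rfl, hp0, hple, hmem, hub⟩
  case pos =>
    have hub1 : ∀ y ∈ L ++ [i], y ≤ mx := by
      intro y hy
      rcases List.mem_append.1 hy with h | h
      · exact hub y h
      · simp only [List.mem_singleton] at h; omega
    have hmax1 : PySem.List.max? (L ++ [i]) (fun x => x) = some mx :=
      max?_eq_some_of _ _ (List.mem_append.2 (Or.inl hmem)) hub1
    have hrem : PySem.List.remove? (L ++ [i]) mx = some ((L ++ [i]).erase mx) :=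
      PySem.List.remove?_eq_some_erase _ _ (List.mem_append.2 (Or.inl hmem))
    have herase1 : (L ++ [i]).erase mx = L.erase mx ++ [i] :=
      List.erase_append_left _ hmem
    by_cases hb : 0 < p ∧ PySem.List.pyGet? pre (p - 1) = some mx
    · -- eviction from the sorted-prefix zone
      obtain ⟨hp1, hpg⟩ := hb
      have hpn : 0 < p.toNat := by omega
      have hpnle : p.toNat ≤ pre.length := by omega
      have hlt : p.toNat - 1 < pre.length := by omega
      have hg : pre[p.toNat - 1]'hlt = mx := by
        rw [PySem.List.pyGet?_of_nonneg pre (show (0:Int) ≤ p - 1 by omega)] at hpg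
        rw [List.getElem?_eq_getElem (by omega : (p - 1).toNat < pre.length)] at hpg
        have := Option.some_inj.mp hpg
        rw [← this]
        congr 1
        omega
      have htk : pre.take p.toNat = pre.take (p.toNat - 1) ++ [mx] := by
        rw [take_eq_take_append pre p.toNat hpn hpnle, hg]
      have hubS : ∀ y ∈ pre.take p.toNat, y ≤ mx := by
        rw [← hg]; exact take_ub pre p.toNat hs hpn hpnle
      have hmxS : mx ∈ pre.take p.toNat := by
        rw [htk]; exact List.mem_append.2 (Or.inr (by simp))
      have heS : (pre.take p.toNat).erase mx = pre.take (p.toNat - 1) := by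
        have h1 : (pre.take p.toNat).erase mx ++ [mx] = pre.take (p.toNat - 1) ++ [mx] := by
          rw [erase_max_append _ _ (hs.sublist (List.take_sublist ..)) hmxS hubS]
          exact htk
        exact List.append_inj_left' h1 rfl
      have hLe : L.erase mx = pre.take (p - 1).toNat ++ tl := by
        rw [hsplit, List.erase_append_left _ hmxS, heS]
        congr 2
        omega
      have hA : topkStepA (L, mx) i =
          (pre.take (p - 1).toNat ++ (tl ++ [i]),
            if p - 1 = 0 then (PySem.List.max? (tl ++ [i]) (fun y => y)).getD mx
            else max (PySem.List.pyGetD pre (p - 1 - 1) mx)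
              ((PySem.List.max? (tl ++ [i]) (fun y => y)).getD mx)) := by
        have hm2 := newmax_spec pre hs (p - 1) mx (tl ++ [i]) (by omega) (by omega) (by simp)
        simp only [topkStepA, if_pos hi, hmax1, hrem, herase1, hLe, List.append_assoc, hm2]
      have hB : topkStepB pre (p, tl, mx) i =
          (p - 1, tl ++ [i],
            if p - 1 = 0 then (PySem.List.max? (tl ++ [i]) (fun y => y)).getD mx
            else max (PySem.List.pyGetD pre (p - 1 - 1) mx)
              ((PySem.List.max? (tl ++ [i]) (fun y => y)).getD mx)) := by
        simp only [topkStepB, if_pos hi, if_pos (⟨hp1, hpg⟩ : 0 < p ∧ PySem.List.pyGet? pre (p - 1) = some mx)]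
      rw [hA, hB]
      have hm2 := newmax_spec pre hs (p - 1) mx (tl ++ [i]) (by omega) (by omega) (by simp)
      refine ⟨rfl, rfl, by omega, by omega, ?_, ?_⟩
      · simpa using PySem.List.max?_mem hm2
      · intro y hy
        simpa using PySem.List.max?_isMax hm2 y (by simpa using hy)
    · -- eviction from the overflow list
      have hnot : mx ∉ pre.take p.toNat := by
        by_cases hp1 : 0 < p
        · intro hmxS
          have hpg : PySem.List.pyGet? pre (p - 1) ≠ some mx := fun hh => hb ⟨hp1, hh⟩
          have hpn : 0 < p.toNat := by omega
          have hpnle : p.toNat ≤ pre.length := by omega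
          have hlt : p.toNat - 1 < pre.length := by omega
          have hle1 : mx ≤ pre[p.toNat - 1]'hlt := take_ub pre p.toNat hs hpn hpnle mx hmxS
          have hmem1 : pre[p.toNat - 1]'hlt ∈ pre.take p.toNat := by
            rw [take_eq_take_append pre p.toNat hpn hpnle]
            exact List.mem_append.2 (Or.inr (by simp))
          have hle2 : pre[p.toNat - 1]'hlt ≤ mx := by
            apply hub
            rw [hsplit]
            exact List.mem_append.2 (Or.inl hmem1)
          have : pre[p.toNat - 1]'hlt = mx := le_antisymm hle2 hle1
          apply hpg
          rw [PySem.List.pyGet?_of_nonneg pre (show (0:Int) ≤ p - 1 by omega)]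
          rw [List.getElem?_eq_getElem (by omega : (p - 1).toNat < pre.length)]
          rw [← this]
          congr 2
          omega
        · have : p.toNat = 0 := by omega
          simp [this]
      have hmxtl : mx ∈ tl := by
        have := hmem
        rw [hsplit] at this
        rcases List.mem_append.1 this with h | h
        · exact absurd h hnot
        · exact h
      have hremB : PySem.List.remove? tl mx = some (tl.erase mx) :=
        PySem.List.remove?_eq_some_erase _ _ hmxtl
      have hLe : L.erase mx = pre.take p.toNat ++ tl.erase mx := by
        rw [hsplit, List.erase_append_right _ hnot]
      have hA : topkStepA (L, mx) i =
          (pre.take p.toNat ++ (tl.erase mx ++ [i]),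
            if p = 0 then (PySem.List.max? (tl.erase mx ++ [i]) (fun y => y)).getD mx
            else max (PySem.List.pyGetD pre (p - 1) mx)
              ((PySem.List.max? (tl.erase mx ++ [i]) (fun y => y)).getD mx)) := by
        have hm2 := newmax_spec pre hs p mx (tl.erase mx ++ [i]) hp0 hple (by simp)
        simp only [topkStepA, if_pos hi, hmax1, hrem, herase1, hLe, List.append_assoc, hm2]
      have hB : topkStepB pre (p, tl, mx) i =
          (p, tl.erase mx ++ [i],
            if p = 0 then (PySem.List.max? (tl.erase mx ++ [i]) (fun y => y)).getD mx
            else max (PySem.List.pyGetD pre (p - 1) mx)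
              ((PySem.List.max? (tl.erase mx ++ [i]) (fun y => y)).getD mx)) := by
        simp only [topkStepB, if_pos hi, if_neg hb, hremB, Option.getD_some]
      rw [hA, hB]
      have hm2 := newmax_spec pre hs p mx (tl.erase mx ++ [i]) hp0 hple (by simp)
      refine ⟨rfl, rfl, hp0, hple, ?_, ?_⟩
      · simpa using PySem.List.max?_mem hm2
      · intro y hy
        simpa using PySem.List.max?_isMax hm2 y (by simpa using hy)

lemma topkFold_inv (pre : List Int) (hs : pre.Pairwise (· ≤ ·)) :
    ∀ (ts : List Int) (a : List Int × Int) (b : Int × List Int × Int),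
      TopkInv pre a b →
      TopkInv pre (ts.foldl topkStepA a) (ts.foldl (topkStepB pre) b) := by
  intro ts
  induction ts with
  | nil => intro a b h; exact h
  | cons t ts ih =>
    intro a b h
    exact ih _ _ (topkStep_inv pre hs a b t h)

lemma topkStepA_length (s : List Int × Int) (i : Int) :
    (topkStepA s i).1.length = s.1.length := by
  unfold topkStepA
  by_cases hi : i < s.2
  · rw [if_pos hi]
    cases hM : PySem.List.max? (s.1 ++ [i]) (fun x => x) with
    | none =>
      rw [PySem.List.max?_eq_none_iff] at hM
      simp at hM
    | some m =>
      have hmem := PySem.List.max?_mem hM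
      have hR : PySem.List.remove? (s.1 ++ [i]) m = some ((s.1 ++ [i]).erase m) :=
        PySem.List.remove?_eq_some_erase _ _ hmem
      have hlen : ((s.1 ++ [i]).erase m).length = s.1.length := by
        rw [List.length_erase_of_mem hmem]
        simp
      simp only [hR]
      cases PySem.List.max? ((s.1 ++ [i]).erase m) (fun x => x) with
      | none => exact hlen
      | some m2 => exact hlen
  · rw [if_neg hi]

lemma topkFoldA_length (ts : List Int) :
    ∀ (a : List Int × Int), (ts.foldl topkStepA a).1.length = a.1.length := by
  induction ts with
  | nil => intro a; rfl
  | cons t ts ih =>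
    intro a
    rw [List.foldl_cons, ih, topkStepA_length]

-- ===== VERDICT (by name: the statement is the Claim_ definition above) =====
theorem topk_min_stack_spec : Claim_unchanged_topk_min_stack := by
  unfold Claim_unchanged_topk_min_stack
  intro array k _ hpre hnd
  unfold D_topk_min_stack at hnd
  unfold Pre_topk_min_stack at hpre
  by_cases hlen : (array.length : Int) ≤ k
  · unfold topk_min_stack topk_min_stack_alt
    rw [if_pos hlen, if_pos hlen]
  · have hk : 0 < k := by
      rcases hpre with h | ⟨ha, h0⟩ | ⟨hneg, _⟩
      · exact h
      · subst ha; simp at hlen; omega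
      · omega
    simp only [topk_min_stack, topk_min_stack_alt, if_neg hlen, if_neg (by omega : ¬ k ≤ 0)]
    have hs : (PySem.List.sorted (PySem.List.slice array none (some k)) (fun x => x) false).Pairwise (· ≤ ·) := by
      simpa using PySem.List.sorted_pairwise (PySem.List.slice array none (some k)) (fun x => x)
    generalize hpredef : PySem.List.sorted (PySem.List.slice array none (some k)) (fun x => x) false = pre at hs ⊢
    have hlenpre : pre.length = k.toNat := by
      rw [← hpredef, PySem.List.length_sorted, PySem.List.slice_to array (le_of_lt hk), List.length_take]
      omega
    have hj1 : (k - 1).toNat < pre.length := by omega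
    have hget : PySem.List.pyGet? pre (k - 1) = some (pre[(k - 1).toNat]'hj1) := by
      rw [PySem.List.pyGet?_of_nonneg pre (by omega)]
      exact List.getElem?_eq_getElem hj1
    have hgetD : PySem.List.pyGetD pre (k - 1) 0 = pre[(k - 1).toNat]'hj1 :=
      PySem.List.pyGetD_eq_getElem pre 0 (by omega) (by omega)
    simp only [hget, hgetD]
    have hinv0 : TopkInv pre (pre, pre[(k - 1).toNat]'hj1) (k, [], pre[(k - 1).toNat]'hj1) := by
      refine ⟨?_, rfl, by omega, by omega, List.getElem_mem _, ?_⟩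
      · rw [show k.toNat = pre.length by omega, List.take_length, List.append_nil]
      · have hub := take_ub pre pre.length hs (by omega) (le_refl _)
        rw [List.take_length] at hub
        have heq : pre[pre.length - 1]'(by omega) = pre[(k - 1).toNat]'hj1 := by
          congr 1
          omega
        rw [heq] at hub
        exact hub
    have hfin := topkFold_inv pre hs (PySem.List.slice array (some k) none) _ _ hinv0
    obtain ⟨hsp, _, hq0, _, _, _⟩ := hfin
    rw [hsp, PySem.List.slice_to pre hq0]

theorem topk_min_stack_changed : Claim_changed_topk_min_stack := by
  unfold Claim_changed_topk_min_stack; decide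

theorem topk_min_stack_tight : Claim_exact_topk_min_stack := by
  unfold Claim_exact_topk_min_stack
  intro array k _ hpre hd
  unfold D_topk_min_stack at hd
  unfold Pre_topk_min_stack at hpre
  have hlen : 2 * (-k) + 1 ≤ (array.length : Int) := by
    rcases hpre with h | ⟨_, h⟩ | ⟨_, h⟩ <;> omega
  have hB : topk_min_stack_alt array k = [] := by
    unfold topk_min_stack_alt
    rw [if_neg (by omega), if_pos (by omega)]
  rw [hB]
  unfold topk_min_stack
  rw [if_neg (by omega)]
  have hkk : k = -(((-k).toNat : Nat) : Int) := by omega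
  generalize hkkdef : (-k).toNat = kk at hkk
  have hms : PySem.List.slice array none (some k) = array.take (array.length - kk) := by
    rw [hkk]
    exact PySem.List.slice_to_neg_natCast array kk (by omega)
  generalize hmsdef : PySem.List.sorted (PySem.List.slice array none (some k)) (fun x => x) false = ms
  have hmslen : ms.length = array.length - kk := by
    rw [← hmsdef, PySem.List.length_sorted, hms, List.length_take]
    omega
  have hget : ∃ v, PySem.List.pyGet? ms (k - 1) = some v := by
    have h1 : k - 1 = -(((kk + 1 : Nat) : Nat) : Int) := by omega
    rw [h1, PySem.List.pyGet?_neg_natCast ms (kk + 1) (by omega) (by omega)]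
    exact ⟨_, List.getElem?_eq_getElem (by omega)⟩
  obtain ⟨v, hv⟩ := hget
  simp only [hv]
  intro hcontra
  have hl := topkFoldA_length (PySem.List.slice array (some k) none) (ms, v)
  rw [hcontra] at hl
  simp only [List.length_nil] at hl
  omega
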